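-- pv_equiv track=rewrite | github.com/JaredBears/Formation-Python | FindLeftPeaks.py | findLeftPeaks
-- ===== SOURCE A (Python) =====
-- def findLeftPeaks(array: list[int]) -> list[int]:
--     N = len(array)
--     left_peaks = []
--     max_so_far = float('-inf')
--     for i in range(N - 1, -1, -1):
--         if array[i] >= max_so_far:
--             left_peaks.append(array[i])
--             max_so_far = array[i]
--     return left_peaks[::-1]
-- ===== SOURCE B (Python) =====
-- def findLeftPeaks(array: list[int]) -> list[int]:
--     stack = []
--     for x in array:
--         while stack and stack[-1] < x:
--             stack.pop()
--         stack.append(x)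
--     return stack
-- ===== Notes on version B (the rewrite author's own statement) =====
-- stated objective: alternative
-- what changed: Replaces A's right-to-left running-maximum scan plus final reversal with a single left-to-right pass maintaining a monotone stack (pop while top < current, then push), returned without reversal.
import Mathlib
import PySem

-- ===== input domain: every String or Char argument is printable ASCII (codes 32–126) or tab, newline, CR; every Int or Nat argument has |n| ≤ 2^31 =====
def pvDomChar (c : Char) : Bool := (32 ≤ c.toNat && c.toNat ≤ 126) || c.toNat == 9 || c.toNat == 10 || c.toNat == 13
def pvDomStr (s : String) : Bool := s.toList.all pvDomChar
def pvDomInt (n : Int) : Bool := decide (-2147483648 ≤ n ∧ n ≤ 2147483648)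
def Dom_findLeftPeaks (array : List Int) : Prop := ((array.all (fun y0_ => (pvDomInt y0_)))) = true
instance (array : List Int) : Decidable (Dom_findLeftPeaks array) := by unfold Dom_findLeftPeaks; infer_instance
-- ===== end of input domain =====

-- B replaces A's right-to-left running-maximum scan (plus final reversal) by a single
-- left-to-right pass maintaining a monotone stack; same O(n) cost, different algorithm.

-- ===== PORT A =====
-- 'array[i] >= max_so_far' with max_so_far starting at float('-inf'): none = -inf
def pvGeOpt (x : Int) (m : Option Int) : Bool :=
  match m with
  | none => true
  | some t => decide (t ≤ x)

-- 'for i in range(N-1, -1, -1)': fuel k+1 means the current index is k; state (left_peaks, max_so_far)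
def findLeftPeaksGo (array : List Int) : Nat → List Int × Option Int → List Int × Option Int
  | 0, st => st
  | k + 1, (peaks, m) =>
      let x := (PySem.List.pyGet? array (k : Int)).getD 0   -- index k is always in range here
      if pvGeOpt x m then findLeftPeaksGo array k (peaks ++ [x], some x)
      else findLeftPeaksGo array k (peaks, m)

def findLeftPeaks (array : List Int) : List Int :=
  (findLeftPeaksGo array array.length ([], none)).1.reverse   -- left_peaks[::-1]

-- ===== PORT B =====
-- the stack is kept top-at-head (Python's list has its top at the end);
-- the final reverse restores Python's left-to-right order
def popLess : List Int → Int → List Int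
  | [], _ => []
  | t :: rest, x => if t < x then popLess rest x else t :: rest

def findLeftPeaks_alt (array : List Int) : List Int :=
  (array.foldl (fun s x => x :: popLess s x) []).reverse

-- ===== PRECONDITION & SPEC =====
def Spec_findLeftPeaks (array : List Int) (out : List Int) : Prop := out = findLeftPeaks_alt array
instance (array : List Int) (out : List Int) : Decidable (Spec_findLeftPeaks array out) := by unfold Spec_findLeftPeaks; infer_instance

-- ===== CLAIM (what is proved, stated in full; the proofs are below) =====
def Claim_equal_findLeftPeaks : Prop := ∀ (array : List Int), Dom_findLeftPeaks array → Spec_findLeftPeaks array (findLeftPeaks array)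

-- ===== LEMMAS AND PROOFS =====

-- common specification: keep x iff x ≥ every element strictly to its right
def pvF : List Int → List Int
  | [] => []
  | x :: xs => if xs.all (fun y => decide (y ≤ x)) then x :: pvF xs else pvF xs

-- right-to-left scan with running max (A's loop, as structural recursion on the reversed list)
def pvR : List Int → Option Int → List Int
  | [], _ => []
  | y :: ys, m => if pvGeOpt y m then y :: pvR ys (some y) else pvR ys m

theorem pvGo_agree (xs : List Int) (x : Int) :
    ∀ k, k ≤ xs.length → ∀ st, findLeftPeaksGo (xs ++ [x]) k st = findLeftPeaksGo xs k st := by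
  intro k
  induction k with
  | zero => intro _ st; rfl
  | succ k ih =>
    intro hk st
    obtain ⟨peaks, m⟩ := st
    have hg : PySem.List.pyGet? (xs ++ [x]) (k : Int) = PySem.List.pyGet? xs (k : Int) := by
      rw [PySem.List.pyGet?_natCast, PySem.List.pyGet?_natCast,
        List.getElem?_append_left (by omega)]
    simp only [findLeftPeaksGo, hg]
    split <;> exact ih (by omega) _

theorem pvGo_eq (xs : List Int) :
    ∀ peaks m, (findLeftPeaksGo xs xs.length (peaks, m)).1 = peaks ++ pvR xs.reverse m := by
  induction xs using List.reverseRecOn with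
  | nil => intro peaks m; simp [findLeftPeaksGo, pvR]
  | append_singleton xs x ih =>
    intro peaks m
    have hlen : (xs ++ [x]).length = xs.length + 1 := by simp
    have hget : PySem.List.pyGet? (xs ++ [x]) (xs.length : Int) = some x := by
      rw [PySem.List.pyGet?_natCast]; simp
    rw [hlen]
    simp only [findLeftPeaksGo, hget, Option.getD_some, List.reverse_append,
      List.reverse_cons, List.reverse_nil, List.nil_append, List.singleton_append, pvR]
    split
    · rw [pvGo_agree xs x xs.length le_rfl, ih]; simp
    · rw [pvGo_agree xs x xs.length le_rfl, ih]

theorem mem_pvR_ge (ys : List Int) : ∀ t z, z ∈ pvR ys (some t) → t ≤ z := by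
  induction ys with
  | nil => intro t z h; simp [pvR] at h
  | cons y ys ih =>
    intro t z h
    simp only [pvR, pvGeOpt] at h
    split at h
    · rcases List.mem_cons.mp h with rfl | h
      · simpa using ‹decide (t ≤ z) = true›
      · have := ih y z h
        have ht : t ≤ y := by simpa using ‹decide (t ≤ y) = true›
        omega
    · exact ih t z h

theorem pvR_some (ys : List Int) :
    ∀ t, pvR ys (some t) = (pvR ys none).filter (fun z => decide (t ≤ z)) := by
  induction ys with
  | nil => intro t; rfl
  | cons y ys ih =>
    intro t
    have hnone : pvR (y :: ys) none = y :: pvR ys (some y) := by simp [pvR, pvGeOpt]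
    rw [hnone]
    simp only [pvR, pvGeOpt, List.filter_cons]
    by_cases h : t ≤ y
    · simp only [h, decide_true, if_true]
      congr 1
      exact (List.filter_eq_self.mpr (fun z hz => by
        simpa using le_trans h (mem_pvR_ge ys y z hz))).symm
    · simp only [h, decide_false]
      rw [ih t, ih y, List.filter_filter]
      apply List.filter_congr
      intro z _
      by_cases hz : t ≤ z
      · have : y ≤ z := by omega
        simp [hz, this]
      · simp [hz]

theorem pvF_append (xs : List Int) (x : Int) :
    pvF (xs ++ [x]) = (pvF xs).filter (fun z => decide (x ≤ z)) ++ [x] := by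
  induction xs with
  | nil => simp [pvF]
  | cons x0 xs ih =>
    simp only [List.cons_append, pvF, List.all_append, List.all_cons, List.all_nil,
      Bool.and_true, Bool.and_eq_true]
    by_cases h0 : xs.all (fun y => decide (y ≤ x0)) = true
    · by_cases hx : x ≤ x0
      · simp [h0, hx, ih]
      · simp [h0, hx, ih]
    · simp [h0, ih]

theorem pvA_eq_pvF (xs : List Int) : (pvR xs.reverse none).reverse = pvF xs := by
  induction xs using List.reverseRecOn with
  | nil => rfl
  | append_singleton xs x ih =>
    have : pvR (xs ++ [x]).reverse none = x :: pvR xs.reverse (some x) := by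
      simp [pvR, pvGeOpt]
    rw [this, List.reverse_cons, pvR_some, ← List.filter_reverse, ih, pvF_append]

theorem findLeftPeaks_eq_pvF (xs : List Int) : findLeftPeaks xs = pvF xs := by
  rw [findLeftPeaks, pvGo_eq xs [] none, List.nil_append, pvA_eq_pvF]

theorem mem_pvF (xs : List Int) : ∀ z, z ∈ pvF xs → z ∈ xs := by
  induction xs with
  | nil => intro z h; simp [pvF] at h
  | cons x xs ih =>
    intro z h
    simp only [pvF] at h
    split at h
    · rcases List.mem_cons.mp h with rfl | h
      · exact List.mem_cons_self
      · exact List.mem_cons_of_mem _ (ih z h)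
    · exact List.mem_cons_of_mem _ (ih z h)

theorem pvF_sorted (xs : List Int) : (pvF xs).Pairwise (fun a b => b ≤ a) := by
  induction xs with
  | nil => simp [pvF]
  | cons x xs ih =>
    simp only [pvF]
    split
    · refine List.Pairwise.cons (fun z hz => ?_) ih
      have := mem_pvF xs z hz
      have hall := (List.all_eq_true.mp ‹_›) z this
      simpa using hall
    · exact ih

theorem popLess_sorted (s : List Int) (x : Int) (hs : s.Pairwise (fun a b => a ≤ b)) :
    popLess s x = s.filter (fun z => decide (x ≤ z)) := by
  induction s with
  | nil => rfl
  | cons t rest ih =>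
    rcases List.pairwise_cons.mp hs with ⟨ht, hrest⟩
    simp only [popLess, List.filter_cons]
    by_cases h : t < x
    · simp only [h, if_true]
      have : ¬ x ≤ t := by omega
      simp only [this, decide_false]
      exact ih hrest
    · simp only [h, if_false]
      have hxt : x ≤ t := by omega
      simp only [hxt, decide_true, if_true]
      congr 1
      exact (List.filter_eq_self.mpr (fun z hz => by
        simpa using le_trans hxt (ht z hz))).symm

theorem pvStep (p : List Int) (x : Int) :
    x :: popLess ((pvF p).reverse) x = (pvF (p ++ [x])).reverse := by
  rw [pvF_append, List.reverse_append, List.reverse_singleton, List.singleton_append,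
    ← List.filter_reverse,
    popLess_sorted _ x (by
      rw [List.pairwise_reverse]
      exact pvF_sorted p)]

theorem pvFoldl (ys : List Int) :
    ∀ p, ys.foldl (fun s x => x :: popLess s x) ((pvF p).reverse) = (pvF (p ++ ys)).reverse := by
  induction ys with
  | nil => intro p; simp
  | cons y ys ih =>
    intro p
    rw [List.foldl_cons, pvStep p y, ih (p ++ [y]), List.append_assoc]
    rfl

theorem findLeftPeaks_alt_eq_pvF (xs : List Int) : findLeftPeaks_alt xs = pvF xs := by
  have h0 : ((pvF ([] : List Int)).reverse) = ([] : List Int) := rfl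
  rw [findLeftPeaks_alt, ← h0, pvFoldl xs [], List.nil_append, List.reverse_reverse]

-- ===== VERDICT (by name: the statement is the Claim_ definition above) =====
theorem findLeftPeaks_spec : Claim_equal_findLeftPeaks := by
  intro array _
  unfold Spec_findLeftPeaks
  rw [findLeftPeaks_eq_pvF, findLeftPeaks_alt_eq_pvF]
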